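-- pv_equiv track=rewrite | github.com/Haidram/codeforces_prblm_solutions | potions (easy).py | solve
-- ===== SOURCE A (Python) =====
-- def solve(n, a):
-- ## Initializing count of drink and health
--     count = health = 0
--
--     i = 0
--     while i < len(a):
--         health += a[i]
--         count += 1
--
-- ## If the health goes below 0, then check for another drink whose value
-- #  is more negative than this one, and leave the most negative one.
--         if health < 0:
--             min_dam = min(a[:i+1])
--             a.remove(min_dam)
--             health -= min_dam
--             count -= 1
--             continue
--         i += 1
--
--     return count
-- ===== SOURCE B (Python) =====
-- def solve(n, a):
--     heap = []   # hand-rolled binary min-heap of drunk potions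
--     health = 0
--     cnt = 0
--     for c in a:
--         # push c
--         heap.append(c)
--         j = len(heap) - 1
--         while j > 0:
--             par = (j - 1) // 2
--             if heap[par] > heap[j]:
--                 heap[par], heap[j] = heap[j], heap[par]
--                 j = par
--             else:
--                 break
--         health += c
--         cnt += 1
--         if health < 0:
--             # pop min
--             m = heap[0]
--             last = heap.pop()
--             if heap:
--                 heap[0] = last
--                 j = 0
--                 size = len(heap)
--                 while True:
--                     l = 2 * j + 1
--                     r = l + 1
--                     s = j
--                     if l < size and heap[l] < heap[s]: s = l
--                     if r < size and heap[r] < heap[s]: s = r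
--                     if s == j: break
--                     heap[j], heap[s] = heap[s], heap[j]
--                     j = s
--             health -= m
--             cnt -= 1
--     return cnt
-- ===== Notes on version B (the rewrite author's own statement) =====
-- stated objective: faster
-- what changed: Instead of rescanning the unsorted drunk-so-far prefix for its minimum and removing it by value on every deficit (min over a slice + list.remove), B keeps the drunk potions in a hand-rolled binary min-heap, so each potion costs one O(log n) push and each give-back one O(log n) pop.
import Mathlib
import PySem

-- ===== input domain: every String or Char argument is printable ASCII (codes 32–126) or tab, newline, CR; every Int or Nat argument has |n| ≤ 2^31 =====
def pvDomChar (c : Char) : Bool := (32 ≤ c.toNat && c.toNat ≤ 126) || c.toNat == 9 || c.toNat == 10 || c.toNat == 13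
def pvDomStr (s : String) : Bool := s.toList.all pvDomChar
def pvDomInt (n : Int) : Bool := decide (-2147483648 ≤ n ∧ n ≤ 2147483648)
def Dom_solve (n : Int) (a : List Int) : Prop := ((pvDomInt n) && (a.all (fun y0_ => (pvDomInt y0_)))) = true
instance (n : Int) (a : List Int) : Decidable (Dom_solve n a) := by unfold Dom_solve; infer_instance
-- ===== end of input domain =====

-- B replaces A's per-deficit min()-scan over a slice plus remove-by-value on the unsorted
-- drunk-so-far prefix by a hand-rolled binary min-heap of the drunk potions.
-- Equivalence is about the RETURN value only: Python A mutates its argument a, B does not.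

-- ===== PORT A =====
-- needed by solveALoop's decreasing_by: a successful remove? shortens the list by one
theorem pvRemoveLen {v : Int} {xs ys : List Int} (h : PySem.List.remove? xs v = some ys) :
    ys.length + 1 = xs.length := by
  by_cases hv : v ∈ xs
  · rw [PySem.List.remove?_eq_some_erase xs v hv] at h
    cases h
    have h1 := List.length_erase_of_mem hv
    have h2 := List.length_pos_of_mem hv
    omega
  · rw [(PySem.List.remove?_eq_none_iff xs v).mpr hv] at h; cases h

def solveALoop (a : List Int) (i : Nat) (count health : Int) : Int :=
  if h : i < a.length then
    let health1 := health + PySem.List.pyGetD a (i : Int) 0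
    let count1 := count + 1
    if health1 < 0 then
      match PySem.List.min? (PySem.List.slice a none (some ((i : Int) + 1))) (fun x => x) with
      | none => count1          -- unreachable: the slice a[:i+1] is nonempty when i < len(a)
      | some min_dam =>
        match hr : PySem.List.remove? a min_dam with
        | none => count1        -- unreachable: min_dam ∈ a
        | some a' => solveALoop a' i count (health1 - min_dam)
    else solveALoop a (i + 1) count1 health1
  else count
termination_by a.length - i
decreasing_by
  · have := pvRemoveLen hr; omega
  · omega

def solve (n : Int) (a : List Int) : Int := solveALoop a 0 0 0

-- ===== PORT B =====
-- Python's simultaneous 'heap[i], heap[j] = heap[j], heap[i]' (indices in range wherever used)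
def swap (h : List Int) (i j : Nat) : List Int := (h.set i (h.getD j 0)).set j (h.getD i 0)

-- Source B's 'while j > 0: par = (j-1)//2; if heap[par] > heap[j]: swap; j = par; else break'
def siftUp (h : List Int) (j : Nat) : List Int :=
  if 0 < j then
    if h.getD ((j - 1) / 2) 0 > h.getD j 0 then siftUp (swap h ((j - 1) / 2) j) ((j - 1) / 2)
    else h
  else h
termination_by j
decreasing_by omega

-- the index Source B's sift-down loop body selects: smallest of j and its two children
def dnext (h : List Int) (j : Nat) : Nat :=
  let l := 2 * j + 1
  let r := 2 * j + 2
  let s1 := if l < h.length ∧ h.getD l 0 < h.getD j 0 then l else j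
  if r < h.length ∧ h.getD r 0 < h.getD s1 0 then r else s1

theorem dnext_facts (h : List Int) (j : Nat) :
    dnext h j = j ∨ (j < dnext h j ∧ dnext h j < h.length) := by
  unfold dnext; dsimp only; split_ifs <;> omega

theorem length_swap (h : List Int) (i j : Nat) : (swap h i j).length = h.length := by
  simp [swap]

-- Source B's 'while True: … if s == j: break; swap; j = s'
def siftDown (h : List Int) (j : Nat) : List Int :=
  if dnext h j = j then h else siftDown (swap h j (dnext h j)) (dnext h j)
termination_by h.length - j
decreasing_by
  rcases dnext_facts h j with heq | hlt
  · omega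
  · rw [length_swap]; omega

def solveBLoop (rem heap : List Int) (health cnt : Int) : Int :=
  match rem with
  | [] => cnt
  | c :: rest =>
    let heap1 := siftUp (heap ++ [c]) heap.length    -- heap.append(c); sift the new last up
    let health1 := health + c
    let cnt1 := cnt + 1
    if health1 < 0 then
      let m := PySem.List.pyGetD heap1 0 0           -- m = heap[0]
      match PySem.List.pop? heap1 (-1) with          -- last = heap.pop()
      | none => cnt1                                 -- unreachable: heap1 is nonempty
      | some (last, h2) =>
        let h3 := if h2.isEmpty then h2 else siftDown (h2.set 0 last) 0
        solveBLoop rest h3 (health1 - m) cnt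
    else solveBLoop rest heap1 health1 cnt1

def solve_alt (n : Int) (a : List Int) : Int := solveBLoop a [] 0 0

-- ===== PRECONDITION & SPEC =====
def Spec_solve (n : Int) (a : List Int) (out : Int) : Prop := out = solve_alt n a
instance (n : Int) (a : List Int) (out : Int) : Decidable (Spec_solve n a out) := by unfold Spec_solve; infer_instance

-- ===== CLAIM (what is proved, stated in full; the proofs are below) =====
def Claim_equal_solve : Prop := ∀ (n : Int) (a : List Int), Dom_solve n a → Spec_solve n a (solve n a)

-- ===== LEMMAS AND PROOFS =====

-- the binary-heap shape invariant: every non-root element dominates its parent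
def IsHeap (h : List Int) : Prop :=
  ∀ k, 0 < k → k < h.length → h.getD ((k - 1) / 2) 0 ≤ h.getD k 0

theorem getD_swap (h : List Int) (i j k : Nat) (hi : i < h.length) (hj : j < h.length) :
    (swap h i j).getD k 0 =
      if k = j then h.getD i 0 else if k = i then h.getD j 0 else h.getD k 0 := by
  by_cases hkj : k = j
  · subst hkj
    simp [swap, List.getD, List.getElem?_set, hj, List.getD_eq_getElem h 0 hi]
  · by_cases hki : k = i
    · subst hki
      simp [swap, List.getD, List.getElem?_set, hkj, Ne.symm hkj, hi,
        List.getD_eq_getElem h 0 hj]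
    · simp [swap, List.getD, List.getElem?_set, Ne.symm hki, Ne.symm hkj, hki, hkj]

theorem swap_perm (h : List Int) (i j : Nat) (hi : i < h.length) (hj : j < h.length) :
    (swap h i j).Perm h := by
  refine List.perm_iff_count.mpr (fun a => ?_)
  rw [swap, List.getD_eq_getElem h 0 hi, List.getD_eq_getElem h 0 hj,
    List.count_set (by simpa using hj), List.count_set hi, List.getElem_set]
  have hcount : List.count a h = 0 → ¬ ((h[i] == a) = true) := by
    intro h0 hbeq
    exact absurd (List.count_pos_iff.mpr (beq_iff_eq.mp hbeq ▸ h.getElem_mem hi)) (by omega)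
  by_cases hij : i = j
  · subst hij; split_ifs <;> simp_all <;> omega
  · simp only [hij, if_neg]
    have h1 : (h[i] == a) = true → 1 ≤ List.count a h := fun hbeq =>
      List.count_pos_iff.mpr (beq_iff_eq.mp hbeq ▸ h.getElem_mem hi)
    split_ifs <;> simp_all <;> omega

theorem root_min (h : List Int) (hh : IsHeap h) :
    ∀ k, k < h.length → h.getD 0 0 ≤ h.getD k 0 := by
  intro k
  induction k using Nat.strong_induction_on with
  | _ k ih =>
    intro hk
    rcases Nat.eq_zero_or_pos k with rfl | hpos
    · exact le_rfl
    · exact le_trans (ih ((k - 1) / 2) (by omega) (by omega)) (hh k hpos hk)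

theorem siftUp_perm : ∀ j h, j < h.length → (siftUp h j).Perm h := by
  intro j
  induction j using Nat.strong_induction_on with
  | _ j ih =>
    intro h hj
    rw [siftUp]
    split_ifs with h0 hgt
    · exact (ih ((j - 1) / 2) (by omega) _ (by rw [length_swap]; omega)).trans
        (swap_perm h ((j - 1) / 2) j (by omega) hj)
    · exact List.Perm.refl h
    · exact List.Perm.refl h

-- sift-up invariant: heap everywhere except possibly at j, and j's children dominate j's parent
def AHup (h : List Int) (j : Nat) : Prop :=
  (∀ k, 0 < k → k < h.length → k ≠ j → h.getD ((k - 1) / 2) 0 ≤ h.getD k 0) ∧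
  (∀ k, 0 < k → k < h.length → 0 < j → (k - 1) / 2 = j → h.getD ((j - 1) / 2) 0 ≤ h.getD k 0)

theorem siftUp_heap : ∀ j h, j < h.length → AHup h j → IsHeap (siftUp h j) := by
  intro j
  induction j using Nat.strong_induction_on with
  | _ j ih =>
    intro h hj hinv
    obtain ⟨inv1, inv2⟩ := hinv
    rw [siftUp]
    split_ifs with h0 hgt
    · -- swap with the parent and continue there
      have hparlt : (j - 1) / 2 < h.length := by omega
      refine ih ((j - 1) / 2) (by omega) _ (by rw [length_swap]; omega) ⟨?_, ?_⟩
      · intro k hk0 hklen hkne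
        rw [length_swap] at hklen
        rw [getD_swap h _ j _ hparlt hj, getD_swap h _ j _ hparlt hj]
        by_cases hkj : k = j
        · subst hkj
          have hp : (k - 1) / 2 ≠ k := by omega
          split_ifs <;> omega
        · have hknej : ¬ ((k : Nat) = j) := hkj
          rw [if_neg hkj, if_neg hkne]
          by_cases hpj : (k - 1) / 2 = j
          · rw [if_pos hpj]
            exact inv2 k hk0 hklen h0 hpj
          · rw [if_neg hpj]
            by_cases hpp : (k - 1) / 2 = (j - 1) / 2
            · rw [if_pos hpp]
              have := inv1 k hk0 hklen hkj
              rw [hpp] at this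
              omega
            · rw [if_neg hpp]
              exact inv1 k hk0 hklen hkj
      · intro k hk0 hklen hpar0 hpk
        rw [length_swap] at hklen
        have hgp : ((j - 1) / 2 - 1) / 2 ≠ j := by omega
        have hgp2 : ((j - 1) / 2 - 1) / 2 ≠ (j - 1) / 2 := by omega
        rw [getD_swap h _ j _ hparlt hj, getD_swap h _ j _ hparlt hj,
          if_neg hgp, if_neg hgp2]
        have hparheap := inv1 ((j - 1) / 2) hpar0 hparlt (by omega)
        by_cases hkj : k = j
        · subst hkj
          rw [if_pos rfl]
          exact hparheap
        · rw [if_neg hkj, if_neg (by omega : ¬ k = (j - 1) / 2)]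
          have hk2 := inv1 k hk0 hklen hkj
          rw [hpk] at hk2
          exact le_trans hparheap hk2
    · -- parent already ≤: full heap
      intro k hk0 hklen
      by_cases hkj : k = j
      · subst hkj; omega
      · exact inv1 k hk0 hklen hkj
    · -- j = 0
      intro k hk0 hklen
      exact inv1 k hk0 hklen (by omega)

theorem push_state (h : List Int) (c : Int) (hh : IsHeap h) :
    (siftUp (h ++ [c]) h.length).Perm (h ++ [c]) ∧ IsHeap (siftUp (h ++ [c]) h.length) := by
  have hlen : h.length < (h ++ [c]).length := by simp
  have hstart : AHup (h ++ [c]) h.length := by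
    constructor
    · intro k hk0 hklen hkne
      have hk : k < h.length := by simp at hklen; omega
      rw [List.getD_append _ _ _ _ (by omega), List.getD_append _ _ _ _ hk]
      exact hh k hk0 hk
    · intro k hk0 hklen _ hpk
      simp at hklen
      omega
  exact ⟨siftUp_perm _ _ hlen, siftUp_heap _ _ hlen hstart⟩

-- what one pass of Source B's sift-down loop body selects, characterised
theorem dnext_spec (h : List Int) (j : Nat) :
    (dnext h j = j →
      (2 * j + 1 < h.length → h.getD j 0 ≤ h.getD (2 * j + 1) 0) ∧
      (2 * j + 2 < h.length → h.getD j 0 ≤ h.getD (2 * j + 2) 0)) ∧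
    (dnext h j ≠ j →
      (dnext h j = 2 * j + 1 ∨ dnext h j = 2 * j + 2) ∧ dnext h j < h.length ∧
      h.getD (dnext h j) 0 < h.getD j 0 ∧
      (2 * j + 1 < h.length → h.getD (dnext h j) 0 ≤ h.getD (2 * j + 1) 0) ∧
      (2 * j + 2 < h.length → h.getD (dnext h j) 0 ≤ h.getD (2 * j + 2) 0)) := by
  unfold dnext
  dsimp only
  split_ifs with h1 h2 h2 <;>
    [skip; skip; skip; skip] <;>
    constructor <;> intro hs <;>
    first
    | exact absurd rfl hs
    | (refine ⟨by omega, by omega, by tauto⟩)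
    | (constructor <;> intro hlt <;> omega)
    | (refine ⟨by omega, by omega, ?_, ?_, ?_⟩ <;> try omega)

theorem siftDown_perm : ∀ n j h, h.length - j ≤ n → j < h.length → (siftDown h j).Perm h := by
  intro n
  induction n with
  | zero =>
    intro j h h0 hj
    rcases dnext_facts h j with heq | hlt
    · rw [siftDown, if_pos heq]
    · omega
  | succ n ih =>
    intro j h h0 hj
    rw [siftDown]
    split_ifs with hs
    · exact List.Perm.refl h
    · rcases dnext_facts h j with heq | ⟨hlt1, hlt2⟩
      · exact absurd heq hs
      · exact (ih (dnext h j) _ (by rw [length_swap]; omega)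
          (by rw [length_swap]; exact hlt2)).trans (swap_perm h j _ hj hlt2)

-- sift-down invariant: heap everywhere except at j, and j's children dominate j's parent
def AHdown (h : List Int) (j : Nat) : Prop :=
  (∀ k, 0 < k → k < h.length → (k - 1) / 2 ≠ j → h.getD ((k - 1) / 2) 0 ≤ h.getD k 0) ∧
  (∀ k, 0 < k → k < h.length → (k - 1) / 2 = j → 0 < j → h.getD ((j - 1) / 2) 0 ≤ h.getD k 0)

theorem siftDown_heap : ∀ n j h, h.length - j ≤ n → j < h.length → AHdown h j →
    IsHeap (siftDown h j) := by
  intro n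
  induction n with
  | zero =>
    intro j h h0 hj hinv
    rcases dnext_facts h j with heq | hlt
    · rw [siftDown, if_pos heq]
      intro k hk0 hklen
      by_cases hpk : (k - 1) / 2 = j
      · have hch := (dnext_spec h j).1 heq
        rw [hpk]
        rcases (by omega : k = 2 * j + 1 ∨ k = 2 * j + 2) with rfl | rfl
        · exact hch.1 hklen
        · exact hch.2 hklen
      · exact hinv.1 k hk0 hklen hpk
    · omega
  | succ n ih =>
    intro j h h0 hj hinv
    obtain ⟨inv1, inv2⟩ := hinv
    rw [siftDown]
    split_ifs with hs
    · intro k hk0 hklen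
      by_cases hpk : (k - 1) / 2 = j
      · have hch := (dnext_spec h j).1 hs
        rw [hpk]
        rcases (by omega : k = 2 * j + 1 ∨ k = 2 * j + 2) with rfl | rfl
        · exact hch.1 hklen
        · exact hch.2 hklen
      · exact inv1 k hk0 hklen hpk
    · obtain ⟨hchild, hslen, hslt, hl, hr⟩ := (dnext_spec h j).2 hs
      set s := dnext h j with hsdef
      have hjs : j < s := by omega
      have hps : (s - 1) / 2 = j := by omega
      refine ih s _ (by rw [length_swap]; omega) (by rw [length_swap]; omega) ⟨?_, ?_⟩
      · intro k hk0 hklen hpkne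
        rw [length_swap] at hklen
        rw [getD_swap h j s _ hj hslen, getD_swap h j s _ hj hslen]
        by_cases hks : k = s
        · rw [hks, if_neg (by omega : ¬ (s - 1) / 2 = s), if_pos hps, if_pos rfl]
          omega
        · rw [if_neg hks]
          by_cases hkj : k = j
          · rw [hkj, if_pos rfl, if_neg (by omega : ¬ (j - 1) / 2 = s),
              if_neg (by omega : ¬ (j - 1) / 2 = j)]
            exact inv2 s (by omega) hslen hps (by omega)
          · rw [if_neg hkj]
            by_cases hpkj : (k - 1) / 2 = j
            · rw [if_neg (by omega : ¬ (k - 1) / 2 = s), if_pos hpkj]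
              rcases (by omega : k = 2 * j + 1 ∨ k = 2 * j + 2) with rfl | rfl
              · exact hl hklen
              · exact hr hklen
            · rw [if_neg (by omega : ¬ (k - 1) / 2 = s), if_neg hpkj]
              exact inv1 k hk0 hklen hpkj
      · intro k hk0 hklen hpk hs0
        rw [length_swap] at hklen
        rw [getD_swap h j s _ hj hslen, getD_swap h j s _ hj hslen]
        have hkgts : s < k := by omega
        rw [hps, if_neg (by omega : ¬ j = s), if_pos rfl,
          if_neg (by omega : ¬ k = s), if_neg (by omega : ¬ k = j)]
        have := inv1 k hk0 hklen (by omega : (k - 1) / 2 ≠ j)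
        rw [hpk] at this
        exact this

theorem getD_dropLast (l : List Int) (m : Nat) (hm : m < l.length - 1) :
    l.dropLast.getD m 0 = l.getD m 0 := by
  rw [List.dropLast_eq_take, List.getD, List.getD, List.getElem?_take]
  simp [hm]

-- Python's min() of any list that is a permutation of a nonempty heap is the heap's root
theorem min?_eq_root (l h1 : List Int) (hh : IsHeap h1) (hne : h1 ≠ [])
    (hp : h1.Perm l) : PySem.List.min? l (fun x => x) = some (h1.getD 0 0) := by
  have h0 : 0 < h1.length := List.length_pos_iff.mpr hne
  have hroot : h1.getD 0 0 ∈ h1 := by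
    rw [List.getD_eq_getElem h1 0 h0]
    exact h1.getElem_mem h0
  cases hmin : PySem.List.min? l (fun x => x) with
  | none =>
    have := (PySem.List.min?_eq_none_iff l (fun x => x)).mp hmin
    subst this
    exact absurd hp.length_eq (by simp; omega)
  | some m' =>
    have hm'l : m' ∈ l := PySem.List.min?_mem hmin
    have hm'h : m' ∈ h1 := hp.mem_iff.mpr hm'l
    have h1le : m' ≤ h1.getD 0 0 := PySem.List.min?_isMin hmin _ (hp.mem_iff.mp hroot)
    have h2le : h1.getD 0 0 ≤ m' := by
      obtain ⟨k, hk, rfl⟩ := List.mem_iff_getElem.mp hm'h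
      rw [← List.getD_eq_getElem h1 0 hk]
      exact root_min h1 hh k hk
    rw [le_antisymm h1le h2le]

-- popping the root of a nonempty heap with at least two elements

-- popping the root of a heap with at least two elements: result is a heap, a permutation of the tail
theorem pop_state (x : Int) (ys : List Int) (hh : IsHeap (x :: ys)) (hne : ys ≠ []) :
    PySem.List.pop? (x :: ys) (-1) = some (ys.getLast hne, x :: ys.dropLast) ∧
    (siftDown ((x :: ys.dropLast).set 0 (ys.getLast hne)) 0).Perm ys ∧
    IsHeap (siftDown ((x :: ys.dropLast).set 0 (ys.getLast hne)) 0) := by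
  have hylen : 0 < ys.length := List.length_pos_iff.mpr hne
  have hset : (x :: ys.dropLast).set 0 (ys.getLast hne) = ys.getLast hne :: ys.dropLast :=
    rfl
  have hlen2 : (ys.getLast hne :: ys.dropLast).length = ys.length := by
    simp; omega
  have hpop : PySem.List.pop? (x :: ys) (-1) = some (ys.getLast hne, x :: ys.dropLast) := by
    have hxys : x :: ys = (x :: ys.dropLast) ++ [ys.getLast hne] := by
      conv_lhs => rw [← List.dropLast_append_getLast (l := x :: ys) (by simp)]
      rw [List.dropLast_cons_of_ne_nil hne, List.getLast_cons hne]
    rw [hxys]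
    exact PySem.List.pop?_last _ _
  have hperm0 : (ys.getLast hne :: ys.dropLast).Perm ys := by
    have := List.perm_append_singleton (ys.getLast hne) ys.dropLast
    rw [List.dropLast_append_getLast hne] at this
    exact this.symm
  have hstart : AHdown (ys.getLast hne :: ys.dropLast) 0 := by
    constructor
    · intro k hk0 hklen hpkne
      rw [hlen2] at hklen
      have hpk0 : 0 < (k - 1) / 2 := by omega
      obtain ⟨m, rfl⟩ : ∃ m, k = m + 1 := ⟨k - 1, by omega⟩
      obtain ⟨q, hq⟩ : ∃ q, (m + 1 - 1) / 2 = q + 1 := ⟨(m + 1 - 1) / 2 - 1, by omega⟩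
      rw [hq, List.getD_cons_succ, List.getD_cons_succ,
        getD_dropLast ys q (by omega), getD_dropLast ys m (by omega)]
      have := hh (m + 1) (by omega) (by simp; omega)
      rw [hq] at this
      simpa [List.getD_cons_succ] using this
    · intro k hk0 hklen hpk h0; omega
  rw [hset]
  refine ⟨hpop, ?_, ?_⟩
  · exact ((siftDown_perm (ys.getLast hne :: ys.dropLast).length 0 _ (by omega)
      (by rw [hlen2]; omega)).trans hperm0)
  · exact siftDown_heap (ys.getLast hne :: ys.dropLast).length 0 _ (by omega)
      (by rw [hlen2]; omega) hstart


-- joint loop invariant: A's list is (drunk prefix p) ++ (remaining s) with i = |p| = count,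
-- health = sum p; B's heap is a permutation of p
theorem main_loop (s : List Int) : ∀ (p h : List Int), IsHeap h → h.Perm p →
    solveALoop (p ++ s) p.length (p.length : Int) p.sum =
      solveBLoop s h h.sum (p.length : Int) := by
  induction s with
  | nil =>
    intro p h hh hp
    rw [solveALoop, dif_neg (by simp)]
    simp [solveBLoop]
  | cons c rest ih =>
    intro p h hh hp
    obtain ⟨hperm1, hheap1⟩ := push_state h c hh
    set heap1 := siftUp (h ++ [c]) h.length with hh1def
    have hsum : h.sum = p.sum := hp.sum_eq
    have hmid : (p ++ [c]).Perm (c :: p) := by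
      simpa using List.perm_middle (a := c) (l₁ := p) (l₂ := ([] : List Int))
    have hpc : heap1.Perm (p ++ [c]) :=
      hperm1.trans ((List.perm_append_singleton c h).trans ((hp.cons c).trans hmid.symm))
    obtain ⟨x, ys, hxys⟩ : ∃ x ys, heap1 = x :: ys := by
      cases hq : heap1 with
      | nil => exact absurd (hq ▸ hperm1).length_eq (by simp)
      | cons a b => exact ⟨a, b, rfl⟩
    have hget : PySem.List.pyGetD (p ++ c :: rest) ((p.length : Nat) : Int) 0 = c := by
      simp [List.getD]
    rw [solveALoop, dif_pos (by simp)]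
    simp only [hget]
    rw [solveBLoop]
    simp only [← hh1def]
    by_cases hneg : p.sum + c < 0
    · rw [if_pos hneg, if_pos (by rw [hsum]; exact hneg)]
      have hslice : PySem.List.slice (p ++ c :: rest) none (some ((p.length : Int) + 1)) = p ++ [c] := by
        have : ((p.length : Int) + 1) = (((p.length + 1 : Nat)) : Int) := by push_cast; ring
        rw [this, PySem.List.slice_to_natCast]
        rw [List.append_cons p c rest]
        exact List.take_left' (by simp)
      have hmin : PySem.List.min? (p ++ [c]) (fun v => v) = some x := by
        have := min?_eq_root (p ++ [c]) heap1 hheap1 (by rw [hxys]; simp) hpc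
        rwa [hxys] at this
      have hmx : PySem.List.pyGetD heap1 0 0 = x := by
        rw [hxys]; exact PySem.List.pyGetD_zero_cons x ys 0
      have hmem : x ∈ p ++ [c] := hpc.mem_iff.mp (hxys ▸ List.mem_cons_self)
      have hremove : PySem.List.remove? (p ++ c :: rest) x = some ((p ++ [c]).erase x ++ rest) := by
        rw [List.append_cons p c rest]
        rw [PySem.List.remove?_eq_some_erase _ x (List.mem_append_left rest hmem)]
        rw [List.erase_append_left rest hmem]
      have hysperm : ys.Perm ((p ++ [c]).erase x) := by
        have := hpc.erase x
        rwa [hxys, List.erase_cons_head] at this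
      have hp'len : ((p ++ [c]).erase x).length = p.length := by
        have := List.length_erase_of_mem hmem; simp at this; simpa using this
      have hsum'' : x + ((p ++ [c]).erase x).sum = p.sum + c := by
        have := List.sum_erase hmem; simp at this; omega
      -- pop facts, by the number of remaining elements
      have hpop : ∃ lastv h2 h3,
          PySem.List.pop? heap1 (-1) = some (lastv, h2) ∧
          (if h2.isEmpty then h2 else siftDown (h2.set 0 lastv) 0) = h3 ∧
          h3.Perm ys ∧ IsHeap h3 := by
        by_cases hys : ys = []
        · subst hys
          refine ⟨x, [], [], ?_, by simp, by simp, by intro k h1 h2; simp at h2⟩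
          rw [hxys, show [x] = [] ++ [x] by simp]
          exact PySem.List.pop?_last _ _
        · obtain ⟨hpop', hperm3, hheap3⟩ := pop_state x ys (hxys ▸ hheap1) hys
          refine ⟨ys.getLast hys, x :: ys.dropLast,
            siftDown ((x :: ys.dropLast).set 0 (ys.getLast hys)) 0, hxys ▸ hpop', by simp, hperm3, hheap3⟩
      obtain ⟨lastv, h2, h3, hpop1, hh3, hperm3, hheap3⟩ := hpop
      simp only [hslice, hmin, hmx, hpop1, hh3]
      have ihr := ih ((p ++ [c]).erase x) h3 hheap3 (hperm3.trans hysperm)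
      rw [hp'len] at ihr
      have herased : h3.sum = ((p ++ [c]).erase x).sum := (hperm3.trans hysperm).sum_eq
      have e1 : ((p ++ [c]).erase x).sum = p.sum + c - x := by omega
      rw [herased, e1] at ihr
      split
      · next heq => rw [hremove] at heq; cases heq
      · next a' heq =>
        rw [hremove] at heq
        injection heq with heq
        subst heq
        rw [hsum]
        exact ihr
    · rw [if_neg hneg, if_neg (by rw [hsum]; exact hneg)]
      have ihr := ih (p ++ [c]) heap1 hheap1 hpc
      rw [List.append_cons p c rest]
      have hlen : ((p ++ [c]).length : Int) = (p.length : Int) + 1 := by simp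
      have hsum1 : (p ++ [c]).sum = p.sum + c := by simp
      rw [hlen, hsum1, show (p ++ [c]).length = p.length + 1 by simp] at ihr
      rw [ihr]
      congr 1
      rw [hpc.sum_eq, hsum]; simp

-- ===== VERDICT (by name: the statement is the Claim_ definition above) =====
theorem solve_spec : Claim_equal_solve := by
  intro n a _
  unfold Spec_solve solve solve_alt
  simpa using main_loop a [] [] (by intro k h1 h2; simp at h2) (by simp)
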